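-- pv_equiv track=rewrite | github.com/ztlmememe/LLMxFM_ICRL | chemistry/utils/utils.py | replace_action_result
-- ===== SOURCE A (Python) =====
-- def replace_action_result(text, action_result):
--     """
--     Replaces the first hallucinated action result in text with the corresponding actual value. Drops proceeding text.
--     """
--     text_by_lines = text.split("\n")
--
--     for i in range(len(text_by_lines)):
--         cur_line = text_by_lines[i]
--         # Found first action.
--         if cur_line.startswith("action:"):
--             text_by_lines = text_by_lines[: i + 1]
--             text_by_lines.append(f"observation: {action_result}")
--             return "\n".join(text_by_lines)
--
--     raise ValueError("No action found in text.")
-- ===== SOURCE B (Python) =====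
-- def replace_action_result(text, action_result):
--     """
--     Replaces the first hallucinated action result in text with the corresponding actual value. Drops proceeding text.
--     """
--     if text.startswith("action:"):
--         pos = 0
--     else:
--         i = text.find("\naction:")
--         if i == -1:
--             raise ValueError("No action found in text.")
--         pos = i + 1
--     end = text.find("\n", pos)
--     if end == -1:
--         end = len(text)
--     return text[:end] + "\nobservation: " + str(action_result)
-- ===== Notes on version B (the rewrite author's own statement) =====
-- stated objective: alternative
-- what changed: B drops A's split-into-a-list-of-lines loop and works on the raw string: it locates the first line-start 'action:' (startswith or find(' action:')), cuts the text at the end of that line with find(' ', pos), and appends the observation line.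
import Mathlib
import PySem

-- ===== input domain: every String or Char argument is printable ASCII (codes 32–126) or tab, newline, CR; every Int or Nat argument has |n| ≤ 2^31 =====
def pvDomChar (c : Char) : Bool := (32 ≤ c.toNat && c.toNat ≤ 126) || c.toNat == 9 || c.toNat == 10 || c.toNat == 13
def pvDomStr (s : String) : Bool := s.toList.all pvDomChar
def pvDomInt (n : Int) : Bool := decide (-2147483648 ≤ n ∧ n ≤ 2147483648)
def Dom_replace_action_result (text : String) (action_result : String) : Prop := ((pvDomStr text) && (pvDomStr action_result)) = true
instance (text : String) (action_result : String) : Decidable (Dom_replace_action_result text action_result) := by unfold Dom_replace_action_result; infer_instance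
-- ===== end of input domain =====

-- B replaces A's split-into-lines loop by a raw-string scan: find the first line-start "action:", cut at the end
-- of that line with find("\n", pos), and append the observation (objective: alternative decomposition, same cost).
-- A raises ValueError when no line starts with "action:"; those inputs are outside Pre_ (both ports return "" there).

-- ===== PORT A =====
-- loop 'for i in range(len(lines)): if lines[i].startswith("action:"): return lines[:i+1]' as structural recursion
-- returning the kept prefix of lines (none = fell through the loop, i.e. the ValueError).
def pvALoop : List (List Char) → Option (List (List Char))
  | [] => none
  | l :: ls =>
    if PySem.Chars.startswith l "action:".toList then some [l]
    else (pvALoop ls).map (l :: ·)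

def replace_action_result (text : String) (action_result : String) : String :=
  let text_by_lines := PySem.Chars.splitOn text.toList ['\n']
  match pvALoop text_by_lines with
  | some kept =>
      String.ofList (PySem.Chars.join ['\n'] (kept ++ ["observation: ".toList ++ action_result.toList]))
  | none => ""   -- raise ValueError("No action found in text.")  — excluded by Pre_

-- ===== PORT B =====
-- pos = 0 if text.startswith("action:") else (text.find("\naction:") + 1, or ValueError when -1)
def pvBPos (cs : List Char) : Option Int :=
  if PySem.Chars.startswith cs "action:".toList then some 0
  else
    let i := PySem.Chars.find cs ('\n' :: "action:".toList)
    if i = -1 then none else some (i + 1)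

def replace_action_result_alt (text : String) (action_result : String) : String :=
  let cs := text.toList
  match pvBPos cs with
  | none => ""   -- raise ValueError("No action found in text.")  — excluded by Pre_
  | some pos =>
      let e := PySem.Chars.findFrom cs ['\n'] pos
      let e' := if e = -1 then (cs.length : Int) else e
      String.ofList (PySem.Chars.slice cs none (some e') ++ ('\n' :: "observation: ".toList) ++ action_result.toList)

-- ===== PRECONDITION & SPEC =====
-- Pre_: some line of the text starts with "action:" — exactly where Python A returns instead of raising ValueError.
def Pre_replace_action_result (text : String) (action_result : String) : Prop :=
  (PySem.Chars.splitOn text.toList ['\n']).any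
    (fun l => PySem.Chars.startswith l "action:".toList) = true
instance (text : String) (action_result : String) : Decidable (Pre_replace_action_result text action_result) := by
  unfold Pre_replace_action_result; infer_instance
def pvWitness_replace_action_result : String × String := ("thought: x\naction: foo[bar]\nobservation: 3\nanswer", "42")

def Spec_replace_action_result (text : String) (action_result : String) (out : String) : Prop := out = replace_action_result_alt text action_result
instance (text : String) (action_result : String) (out : String) : Decidable (Spec_replace_action_result text action_result out) := by unfold Spec_replace_action_result; infer_instance

-- ===== CLAIM (what is proved, stated in full; the proofs are below) =====
def Claim_equal_replace_action_result : Prop := ∀ (text : String) (action_result : String), Dom_replace_action_result text action_result → Pre_replace_action_result text action_result → Spec_replace_action_result text action_result (replace_action_result text action_result)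

-- ===== LEMMAS AND PROOFS =====

-- proof-side views of the two ports, as Options over List Char
def pvACore (cs ar : List Char) : Option (List Char) :=
  (pvALoop (PySem.Chars.splitOn cs ['\n'])).map
    (fun kept => PySem.Chars.join ['\n'] (kept ++ ["observation: ".toList ++ ar]))

def pvBCore (cs ar : List Char) : Option (List Char) :=
  (pvBPos cs).map (fun pos =>
    let e := PySem.Chars.findFrom cs ['\n'] pos
    let e' := if e = -1 then (cs.length : Int) else e
    PySem.Chars.slice cs none (some e') ++ ('\n' :: "observation: ".toList) ++ ar)

lemma pvA_eq_core (text ar : String) :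
    replace_action_result text ar = String.ofList ((pvACore text.toList ar.toList).getD []) := by
  unfold replace_action_result pvACore
  cases h : pvALoop (PySem.Chars.splitOn text.toList ['\n']) <;> simp [h]

lemma pvB_eq_core (text ar : String) :
    replace_action_result_alt text ar = String.ofList ((pvBCore text.toList ar.toList).getD []) := by
  unfold replace_action_result_alt pvBCore
  cases h : pvBPos text.toList <;> simp [h]

-- ---- splitOn structure (sep = ['\n']) ----
lemma pvGo_acc (l : List Char) (fuel : Nat) (cur : List Char) (acc : List (List Char)) :
    PySem.Chars.splitOn.go ['\n'] fuel l cur acc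
      = acc.reverse ++ PySem.Chars.splitOn.go ['\n'] fuel l cur [] := by
  induction l generalizing fuel cur acc with
  | nil => cases fuel <;> simp [PySem.Chars.splitOn.go]
  | cons c rest ih =>
    cases fuel with
    | zero => simp [PySem.Chars.splitOn.go]
    | succ f =>
      rw [PySem.Chars.splitOn.go]
      rw [show PySem.Chars.splitOn.go ['\n'] (f+1) (c :: rest) cur [] =
        if ['\n'].isPrefixOf (c :: rest) = true then
          PySem.Chars.splitOn.go ['\n'] f (List.drop ['\n'].length (c::rest)) [] (cur.reverse :: ([] : List (List Char)))
        else PySem.Chars.splitOn.go ['\n'] f rest (c :: cur) [] from by rw [PySem.Chars.splitOn.go]]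
      by_cases hc : ['\n'].isPrefixOf (c :: rest) = true
      · simp only [hc, if_pos, List.length_cons, List.length_nil, List.drop_succ_cons, List.drop_zero]
        rw [ih f [] (cur.reverse :: acc), ih f [] [cur.reverse]]
        simp
      · simp only [hc, if_neg, Bool.false_eq_true, not_false_eq_true]
        rw [ih f (c :: cur) acc]

lemma pvGo_nosep (l : List Char) (fuel : Nat) (cur : List Char) (acc : List (List Char))
    (h : '\n' ∉ l) (hf : l.length ≤ fuel) :
    PySem.Chars.splitOn.go ['\n'] fuel l cur acc = ((cur.reverse ++ l) :: acc).reverse := by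
  induction l generalizing fuel cur with
  | nil => cases fuel <;> simp [PySem.Chars.splitOn.go]
  | cons c rest ih =>
    cases fuel with
    | zero => simp at hf
    | succ f =>
      rw [PySem.Chars.splitOn.go]
      have hc : c ≠ '\n' := fun hh => h (by simp [hh])
      have hpre : ['\n'].isPrefixOf (c :: rest) = false := by
        simp [List.isPrefixOf]; exact fun hh => (hc hh.symm).elim
      simp only [hpre, Bool.false_eq_true, ite_false]
      rw [ih f (c :: cur) (fun hh => h (by simp [hh])) (by simpa using Nat.succ_le_succ_iff.mp hf)]
      simp

lemma pvGo_sep (l0 : List Char) (fuel : Nat) (rest cur : List Char) (acc : List (List Char))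
    (h : '\n' ∉ l0) (hf : l0.length < fuel) :
    PySem.Chars.splitOn.go ['\n'] fuel (l0 ++ '\n' :: rest) cur acc
      = PySem.Chars.splitOn.go ['\n'] (fuel - (l0.length + 1)) rest [] ((cur.reverse ++ l0) :: acc) := by
  induction l0 generalizing fuel cur with
  | nil =>
    cases fuel with
    | zero => simp at hf
    | succ f =>
      simp only [List.nil_append]
      rw [PySem.Chars.splitOn.go]
      have hpre : ['\n'].isPrefixOf ('\n' :: rest) = true := by simp [List.isPrefixOf]
      simp [hpre]
  | cons c l0' ih =>
    cases fuel with
    | zero => simp at hf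
    | succ f =>
      simp only [List.cons_append]
      rw [PySem.Chars.splitOn.go]
      have hc : c ≠ '\n' := fun hh => h (by simp [hh])
      have hpre : ['\n'].isPrefixOf (c :: (l0' ++ '\n' :: rest)) = false := by
        simp [List.isPrefixOf]; exact fun hh => (hc hh.symm).elim
      simp only [hpre, Bool.false_eq_true, ite_false]
      rw [ih f (c :: cur) (fun hh => h (by simp [hh])) (by simpa using Nat.succ_le_succ_iff.mp hf)]
      simp [Nat.succ_sub_succ]

lemma pvSplit_no_nl (cs : List Char) (h : '\n' ∉ cs) :
    PySem.Chars.splitOn cs ['\n'] = [cs] := by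
  unfold PySem.Chars.splitOn
  rw [pvGo_nosep cs (cs.length + 1) [] [] h (by omega)]
  simp

lemma pvSplit_cons (l0 rest : List Char) (h : '\n' ∉ l0) :
    PySem.Chars.splitOn (l0 ++ '\n' :: rest) ['\n'] = l0 :: PySem.Chars.splitOn rest ['\n'] := by
  unfold PySem.Chars.splitOn
  rw [pvGo_sep l0 ((l0 ++ '\n' :: rest).length + 1) rest [] [] h (by simp)]
  have hfuel : (l0 ++ '\n' :: rest).length + 1 - (l0.length + 1) = rest.length + 1 := by simp
  rw [hfuel, pvGo_acc rest (rest.length + 1) [] [List.reverse [] ++ l0]]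
  simp

-- ---- find characterisation (from the cited PySem spec lemmas) ----
lemma pvFind_eq_coe (cs sub : List Char) (k : Nat)
    (h1 : sub <+: cs.drop k) (h2 : ∀ i, i < k → ¬ sub <+: cs.drop i) :
    PySem.Chars.find cs sub = (k : Int) := by
  have hin : sub <:+: cs := List.IsInfix.trans h1.isInfix (List.drop_suffix k cs).isInfix
  have h0 : 0 ≤ PySem.Chars.find cs sub := (PySem.Chars.find_nonneg_iff cs sub).mpr hin
  obtain ⟨ha, hb⟩ := PySem.Chars.find_spec h0
  rcases Nat.lt_trichotomy (PySem.Chars.find cs sub).toNat k with hlt | heq | hgt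
  · exact absurd ha (h2 _ hlt)
  · omega
  · exact absurd h1 (hb k hgt)

lemma pvFind_eq_neg (cs sub : List Char) (h : ∀ i, ¬ sub <+: cs.drop i) :
    PySem.Chars.find cs sub = -1 := by
  rw [PySem.Chars.find_eq_neg_one_iff]
  intro hin
  obtain ⟨j, hj⟩ := (PySem.Chars.exists_prefix_drop_iff_isIn sub cs).mpr
    ((PySem.Chars.isIn_iff_infix sub cs).mpr hin)
  exact h j hj

-- no occurrence of '\n'::tail can start inside the newline-free block l0
lemma pvNoOcc_lt (l0 xs tail : List Char) (h : '\n' ∉ l0) (i : Nat) (hi : i < l0.length) :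
    ¬ ('\n' :: tail) <+: (l0 ++ xs).drop i := by
  intro hp
  rw [List.drop_append_of_le_length (le_of_lt hi), List.drop_eq_getElem_cons hi,
    List.cons_append] at hp
  exact h ((List.cons_prefix_cons.mp hp).1 ▸ List.getElem_mem hi)

-- a prefix without '\n' survives takeWhile (· ≠ '\n')
lemma pvPrefix_takeWhile (p : List Char) : ∀ (cs : List Char), p <+: cs → '\n' ∉ p →
    p <+: cs.takeWhile (· ≠ '\n') := by
  induction p with
  | nil => intro cs _ _; exact List.nil_prefix
  | cons c p' ih =>
    intro cs hp h
    cases cs with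
    | nil => simp at hp
    | cons d cs' =>
      obtain ⟨hc, hp'⟩ := List.cons_prefix_cons.mp hp
      subst hc
      have hc : c ≠ '\n' := fun hh => h (by simp [hh])
      rw [List.takeWhile_cons, if_pos (by simpa using hc)]
      exact List.cons_prefix_cons.mpr ⟨rfl, ih cs' hp' (fun hh => h (by simp [hh]))⟩

-- join with a nonempty tail
lemma pvJoin_cons (x : List Char) (L : List (List Char)) (hL : L ≠ []) :
    PySem.Chars.join ['\n'] (x :: L) = x ++ '\n' :: PySem.Chars.join ['\n'] L := by
  cases L with
  | nil => exact absurd rfl hL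
  | cons y L' => rw [PySem.Chars.join_cons_cons]; simp

-- drop past the first line
lemma pvDrop_line (l0 rest : List Char) (j : Nat) :
    (l0 ++ '\n' :: rest).drop (l0.length + (1 + j)) = rest.drop j := by
  rw [List.drop_length_add_append, Nat.add_comm 1 j, List.drop_succ_cons]

-- no line-start occurrence anywhere
lemma pvNoOccAll (l0 rest : List Char) (hnl0 : '\n' ∉ l0)
    (hr : ¬ "action:".toList <+: rest)
    (hnone : ∀ j, ¬ ('\n' :: "action:".toList) <+: rest.drop j) (i : Nat) :
    ¬ ('\n' :: "action:".toList) <+: (l0 ++ '\n' :: rest).drop i := by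
  rcases Nat.lt_trichotomy i l0.length with hlt | heq | hgt
  · exact pvNoOcc_lt l0 ('\n' :: rest) _ hnl0 i hlt
  · subst heq
    rw [List.drop_left]
    intro hp
    exact hr (List.cons_prefix_cons.mp hp).2
  · have hid : i = l0.length + (1 + (i - l0.length - 1)) := by omega
    rw [hid, pvDrop_line]
    exact hnone (i - l0.length - 1)

-- ---- the B-side position, one line down ----
lemma pvBPos_bounds (rest : List Char) (q : Int) (hq : pvBPos rest = some q) :
    0 ≤ q ∧ q.toNat ≤ rest.length := by
  unfold pvBPos at hq
  by_cases hs : PySem.Chars.startswith rest "action:".toList = true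
  · rw [if_pos hs] at hq
    have hq0 : (0 : Int) = q := Option.some.inj hq
    omega
  · rw [if_neg hs] at hq
    by_cases hfr : PySem.Chars.find rest ('\n' :: "action:".toList) = -1
    · rw [if_pos hfr] at hq; simp at hq
    · rw [if_neg hfr] at hq
      have hq1 : PySem.Chars.find rest ('\n' :: "action:".toList) + 1 = q := Option.some.inj hq
      have h0 : 0 ≤ PySem.Chars.find rest ('\n' :: "action:".toList) := by
        have := PySem.Chars.neg_one_le_find rest ('\n' :: "action:".toList)
        omega
      obtain ⟨ha, _⟩ := PySem.Chars.find_spec h0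
      have hlen : (PySem.Chars.find rest ('\n' :: "action:".toList)).toNat < rest.length := by
        by_contra hge
        rw [List.drop_eq_nil_of_le (by omega)] at ha
        simpa using ha.length_le
      omega

lemma pvBPos_step (l0 rest : List Char) (hnl0 : '\n' ∉ l0)
    (hs : PySem.Chars.startswith (l0 ++ '\n' :: rest) "action:".toList = false) :
    pvBPos (l0 ++ '\n' :: rest) = (pvBPos rest).map (fun q => (l0.length : Int) + 1 + q) := by
  unfold pvBPos
  rw [if_neg (by rw [hs]; simp)]
  by_cases hr : PySem.Chars.startswith rest "action:".toList = true
  · rw [if_pos hr]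
    have hfind : PySem.Chars.find (l0 ++ '\n' :: rest) ('\n' :: "action:".toList) = (l0.length : Int) := by
      apply pvFind_eq_coe
      · rw [List.drop_left]
        exact List.cons_prefix_cons.mpr ⟨rfl, (PySem.Chars.startswith_iff _ _).mp hr⟩
      · exact fun i hi => pvNoOcc_lt l0 ('\n' :: rest) _ hnl0 i hi
    rw [hfind, if_neg (by omega)]
    simp
  · rw [if_neg hr]
    have hr' : ¬ "action:".toList <+: rest := fun hh => hr ((PySem.Chars.startswith_iff _ _).mpr hh)
    by_cases hfr : PySem.Chars.find rest ('\n' :: "action:".toList) = -1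
    · have hnone : ∀ j, ¬ ('\n' :: "action:".toList) <+: rest.drop j := by
        intro j hj
        exact ((PySem.Chars.find_eq_neg_one_iff _ _).mp hfr)
          ((PySem.Chars.isIn_iff_infix _ _).mp
            ((PySem.Chars.exists_prefix_drop_iff_isIn _ _).mp ⟨j, hj⟩))
      have hcs : PySem.Chars.find (l0 ++ '\n' :: rest) ('\n' :: "action:".toList) = -1 :=
        pvFind_eq_neg _ _ (pvNoOccAll l0 rest hnl0 hr' hnone)
      rw [hcs, hfr]
      simp
    · have h0 : 0 ≤ PySem.Chars.find rest ('\n' :: "action:".toList) := by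
        have := PySem.Chars.neg_one_le_find rest ('\n' :: "action:".toList)
        omega
      obtain ⟨ha, hb⟩ := PySem.Chars.find_spec h0
      set jn := (PySem.Chars.find rest ('\n' :: "action:".toList)).toNat with hjn
      have hfind : PySem.Chars.find (l0 ++ '\n' :: rest) ('\n' :: "action:".toList)
          = ((l0.length + (1 + jn) : Nat) : Int) := by
        apply pvFind_eq_coe
        · rw [pvDrop_line]; exact ha
        · intro i hi
          rcases Nat.lt_trichotomy i l0.length with hlt | heq | hgt
          · exact pvNoOcc_lt l0 ('\n' :: rest) _ hnl0 i hlt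
          · subst heq
            rw [List.drop_left]
            intro hp
            exact hr' (List.cons_prefix_cons.mp hp).2
          · have hid : i = l0.length + (1 + (i - l0.length - 1)) := by omega
            rw [hid, pvDrop_line]
            exact hb (i - l0.length - 1) (by omega)
      rw [hfind, if_neg (by push_cast; omega), if_neg hfr]
      have hq1 : PySem.Chars.find rest ('\n' :: "action:".toList) = (jn : Int) := by omega
      rw [hq1]
      simp only [Option.map_some, Option.some.injEq]
      push_cast
      ring

-- ---- main equivalence of the cores ----
lemma pvCore_b (cs ar : List Char)
    (hs : PySem.Chars.startswith cs "action:".toList = false) (hn : '\n' ∉ cs) :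
    pvACore cs ar = pvBCore cs ar := by
  have hs' : PySem.Chars.startswith cs ['a','c','t','i','o','n',':'] = false := hs
  have hfind : PySem.Chars.find cs ('\n' :: "action:".toList) = -1 :=
    pvFind_eq_neg _ _ (fun i hp =>
      hn ((List.IsInfix.trans hp.isInfix (List.drop_suffix i cs).isInfix).mem (by simp)))
  unfold pvACore pvBCore pvBPos
  rw [pvSplit_no_nl cs hn, if_neg (by rw [hs]; simp), hfind]
  simp [pvALoop, hs']

lemma pvCore_a1 (cs ar : List Char)
    (hs : PySem.Chars.startswith cs "action:".toList = true) (hn : '\n' ∉ cs) :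
    pvACore cs ar = pvBCore cs ar := by
  have hs' : PySem.Chars.startswith cs ['a','c','t','i','o','n',':'] = true := hs
  have hfind : PySem.Chars.find cs ['\n'] = -1 :=
    pvFind_eq_neg _ _ (fun i hp =>
      hn ((List.IsInfix.trans hp.isInfix (List.drop_suffix i cs).isInfix).mem (by simp)))
  unfold pvACore pvBCore pvBPos
  rw [pvSplit_no_nl cs hn, if_pos hs]
  simp [pvALoop, hs, hs', PySem.Chars.findFrom_zero, hfind,
    PySem.Chars.join_cons_cons, PySem.Chars.join_singleton, PySem.Chars.slice_eq_listSlice,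
    PySem.List.slice_to_natCast]

lemma pvCore_a2 (l0 rest ar : List Char) (hnl0 : '\n' ∉ l0)
    (hs : PySem.Chars.startswith (l0 ++ '\n' :: rest) "action:".toList = true) :
    pvACore (l0 ++ '\n' :: rest) ar = pvBCore (l0 ++ '\n' :: rest) ar := by
  have htw : (l0 ++ '\n' :: rest).takeWhile (fun x => decide (x ≠ '\n')) = l0 := by
    rw [List.takeWhile_append_of_pos
      (by intro a ha; simp only [decide_eq_true_eq]; exact fun hh => hnl0 (hh ▸ ha))]
    simp
  have hpl0 : "action:".toList <+: l0 := by
    have := pvPrefix_takeWhile _ _ ((PySem.Chars.startswith_iff _ _).mp hs) (by decide)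
    rwa [htw] at this
  have hsl0 : PySem.Chars.startswith l0 "action:".toList = true :=
    (PySem.Chars.startswith_iff _ _).mpr hpl0
  have hsl0' : PySem.Chars.startswith l0 ['a','c','t','i','o','n',':'] = true := hsl0
  have hfind : PySem.Chars.find (l0 ++ '\n' :: rest) ['\n'] = (l0.length : Int) := by
    apply pvFind_eq_coe
    · rw [List.drop_left]
      exact List.cons_prefix_cons.mpr ⟨rfl, List.nil_prefix⟩
    · exact fun i hi => pvNoOcc_lt l0 ('\n' :: rest) [] hnl0 i hi
  unfold pvACore pvBCore pvBPos
  rw [pvSplit_cons _ _ hnl0, if_pos hs]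
  simp only [Option.map_some]
  rw [PySem.Chars.findFrom_zero, hfind]
  rw [if_neg (by omega)]
  simp [pvALoop, hsl0, hsl0', PySem.Chars.join_cons_cons, PySem.Chars.join_singleton,
    PySem.Chars.slice_eq_listSlice, PySem.List.slice_to_natCast, List.take_left]

lemma pvCore_c (l0 rest ar : List Char) (hnl0 : '\n' ∉ l0)
    (hs : PySem.Chars.startswith (l0 ++ '\n' :: rest) "action:".toList = false)
    (hrec : pvACore rest ar = pvBCore rest ar) :
    pvACore (l0 ++ '\n' :: rest) ar = pvBCore (l0 ++ '\n' :: rest) ar := by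
  have hsl0 : PySem.Chars.startswith l0 "action:".toList = false := by
    cases h : PySem.Chars.startswith l0 "action:".toList with
    | false => rfl
    | true =>
      have : "action:".toList <+: (l0 ++ '\n' :: rest) :=
        ((PySem.Chars.startswith_iff _ _).mp h).trans (List.prefix_append l0 _)
      rw [(PySem.Chars.startswith_iff _ _).mpr this] at hs
      exact hs
  have hsl0' : PySem.Chars.startswith l0 ['a','c','t','i','o','n',':'] = false := hsl0
  have hA : pvACore (l0 ++ '\n' :: rest) ar
      = (pvACore rest ar).map (fun s => l0 ++ '\n' :: s) := by
    unfold pvACore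
    rw [pvSplit_cons _ _ hnl0]
    cases hL : pvALoop (PySem.Chars.splitOn rest ['\n']) with
    | none => simp [pvALoop, hsl0', hL]
    | some ks =>
      simp only [pvALoop, hsl0, Bool.false_eq_true, ite_false, hL, Option.map_some]
      rw [show (PySem.Chars.join ['\n'] (l0 :: ks ++ ["observation: ".toList ++ ar]))
            = l0 ++ '\n' :: PySem.Chars.join ['\n'] (ks ++ ["observation: ".toList ++ ar]) from
          pvJoin_cons _ _ (by simp)]
  have hB : pvBCore (l0 ++ '\n' :: rest) ar
      = (pvBCore rest ar).map (fun s => l0 ++ '\n' :: s) := by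
    unfold pvBCore
    rw [pvBPos_step _ _ hnl0 hs]
    cases hq : pvBPos rest with
    | none => simp
    | some q =>
      obtain ⟨hq0, hqlen⟩ := pvBPos_bounds rest q hq
      set qn := q.toNat with hqn
      simp only [Option.map_some]
      have hc1 : (l0.length : Int) + 1 + q = ((l0.length + (1 + qn) : Nat) : Int) := by
        push_cast; omega
      have hc2 : q = ((qn : Nat) : Int) := by omega
      rw [hc1, PySem.Chars.findFrom_natCast _ _ _ (by simp; omega), pvDrop_line]
      rw [hc2, PySem.Chars.findFrom_natCast _ _ _ (by omega)]
      by_cases hf : PySem.Chars.find (rest.drop qn) ['\n'] = -1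
      · rw [if_pos hf, if_pos hf, if_pos rfl, if_pos rfl,
          show (((l0 ++ '\n' :: rest).length : Nat) : Int) = ((l0.length + (1 + rest.length) : Nat) : Int) from
            by push_cast [List.length_append, List.length_cons]; ring]
        simp only [PySem.Chars.slice_eq_listSlice, PySem.List.slice_to_natCast]
        rw [List.take_length_add_append, Nat.add_comm 1 rest.length, List.take_succ_cons,
          List.take_length]
        simp
      · have h0f : 0 ≤ PySem.Chars.find (rest.drop qn) ['\n'] := by
          have := PySem.Chars.neg_one_le_find (rest.drop qn) ['\n']
          omega
        set f0n := (PySem.Chars.find (rest.drop qn) ['\n']).toNat with hf0n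
        have hfv : PySem.Chars.find (rest.drop qn) ['\n'] = (f0n : Int) := by omega
        rw [if_neg hf, if_neg hf, hfv]
        rw [if_neg (by push_cast; omega), if_neg (by push_cast; omega)]
        have hc3 : ((l0.length + (1 + qn) : Nat) : Int) + (f0n : Int)
            = ((l0.length + (1 + (qn + f0n)) : Nat) : Int) := by push_cast; ring
        have hc4 : ((qn : Nat) : Int) + (f0n : Int) = ((qn + f0n : Nat) : Int) := by push_cast; ring
        rw [hc3, hc4]
        simp only [PySem.Chars.slice_eq_listSlice, PySem.List.slice_to_natCast]
        rw [List.take_length_add_append, Nat.add_comm 1 (qn + f0n), List.take_succ_cons]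
        simp
  rw [hA, hB, hrec]

-- ---- main equivalence of the cores ----
lemma pvCore_eq (ar : List Char) : ∀ (n : Nat) (cs : List Char), cs.length ≤ n →
    pvACore cs ar = pvBCore cs ar := by
  intro n
  induction n with
  | zero =>
    intro cs hle
    have hcs : cs = [] := List.eq_nil_of_length_eq_zero (Nat.le_zero.mp hle)
    subst hcs
    exact pvCore_b [] ar (by decide) (by simp)
  | succ n ih =>
    intro cs hle
    cases hs : PySem.Chars.startswith cs "action:".toList with
    | true =>
      cases hd : cs.dropWhile (fun x => decide (x ≠ '\n')) with
      | nil =>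
        apply pvCore_a1 cs ar hs
        intro hmem
        have := List.takeWhile_append_dropWhile (p := fun x => decide (x ≠ '\n')) (l := cs)
        rw [hd, List.append_nil] at this
        have := List.mem_takeWhile_imp (this ▸ hmem)
        simp at this
      | cons d rest =>
        have hdnl : d = '\n' := by
          have hne : cs.dropWhile (fun x => decide (x ≠ '\n')) ≠ [] := by rw [hd]; simp
          have := List.head_dropWhile_not (fun x => decide (x ≠ '\n')) hne
          simp only [hd, List.head_cons, decide_eq_false_iff_not, Decidable.not_not] at this
          exact this
        have hcs : cs = cs.takeWhile (fun x => decide (x ≠ '\n')) ++ '\n' :: rest := by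
          conv_lhs => rw [← List.takeWhile_append_dropWhile (p := fun x => decide (x ≠ '\n')) (l := cs)]
          rw [hd, hdnl]
        have hnl0 : '\n' ∉ cs.takeWhile (fun x => decide (x ≠ '\n')) := by
          intro hmem
          have := List.mem_takeWhile_imp hmem
          simp at this
        rw [hcs]
        exact pvCore_a2 _ rest ar hnl0 (hcs ▸ hs)
    | false =>
      cases hd : cs.dropWhile (fun x => decide (x ≠ '\n')) with
      | nil =>
        apply pvCore_b cs ar hs
        intro hmem
        have := List.takeWhile_append_dropWhile (p := fun x => decide (x ≠ '\n')) (l := cs)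
        rw [hd, List.append_nil] at this
        have := List.mem_takeWhile_imp (this ▸ hmem)
        simp at this
      | cons d rest =>
        have hdnl : d = '\n' := by
          have hne : cs.dropWhile (fun x => decide (x ≠ '\n')) ≠ [] := by rw [hd]; simp
          have := List.head_dropWhile_not (fun x => decide (x ≠ '\n')) hne
          simp only [hd, List.head_cons, decide_eq_false_iff_not, Decidable.not_not] at this
          exact this
        have hcs : cs = cs.takeWhile (fun x => decide (x ≠ '\n')) ++ '\n' :: rest := by
          conv_lhs => rw [← List.takeWhile_append_dropWhile (p := fun x => decide (x ≠ '\n')) (l := cs)]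
          rw [hd, hdnl]
        have hnl0 : '\n' ∉ cs.takeWhile (fun x => decide (x ≠ '\n')) := by
          intro hmem
          have := List.mem_takeWhile_imp hmem
          simp at this
        have hrlen : rest.length ≤ n := by
          have : cs.length = (cs.takeWhile (fun x => decide (x ≠ '\n'))).length + (1 + rest.length) := by
            conv_lhs => rw [hcs]
            simp only [List.length_append, List.length_cons]
            omega
          omega
        rw [hcs]
        exact pvCore_c _ rest ar hnl0 (hcs ▸ hs) (ih rest hrlen)

-- ===== VERDICT (by name: the statement is the Claim_ definition above) =====
theorem replace_action_result_spec : Claim_equal_replace_action_result := by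
  intro text ar _ _
  show _ = _
  rw [pvA_eq_core, pvB_eq_core, pvCore_eq ar.toList text.toList.length text.toList le_rfl]
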